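-- pv_equiv track=rewrite | github.com/ebehlmann/puzzling | python/advent_of_code/2015/day_11.py | check_for_sequence
-- ===== SOURCE A (Python) =====
-- def check_for_sequence(password):
-- 	i = 0
-- 	while i < len(password) - 2:
-- 		if ord(password[i]) - ord(password[i+1]) == -1:
-- 			if ord(password[i+1]) - ord(password[i+2]) == -1:
-- 				return True
-- 		i += 1
-- 	return False
-- ===== SOURCE B (Python) =====
-- def check_for_sequence(password):
-- 	run = 1
-- 	for i in range(1, len(password)):
-- 		if ord(password[i]) - ord(password[i-1]) == 1:
-- 			run += 1
-- 			if run == 3: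
-- 				return True
-- 		else:
-- 			run = 1
-- 	return False
-- ===== Notes on version B (the rewrite author's own statement) =====
-- stated objective: alternative
-- what changed: B replaces A's two-ahead double-difference window check with a single pass over adjacent pairs maintaining a run-length counter that triggers at 3 (one ord/comparison per position instead of two).
import Mathlib
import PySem

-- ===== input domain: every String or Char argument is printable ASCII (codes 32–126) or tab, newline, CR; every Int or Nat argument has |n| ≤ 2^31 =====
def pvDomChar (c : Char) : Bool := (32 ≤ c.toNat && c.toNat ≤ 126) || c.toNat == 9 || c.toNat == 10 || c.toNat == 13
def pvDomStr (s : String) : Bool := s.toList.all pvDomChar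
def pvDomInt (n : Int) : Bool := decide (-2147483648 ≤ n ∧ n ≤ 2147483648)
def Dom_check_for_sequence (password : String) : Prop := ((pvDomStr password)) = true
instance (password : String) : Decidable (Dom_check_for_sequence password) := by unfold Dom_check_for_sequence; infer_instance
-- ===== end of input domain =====

-- B changes the decomposition only (run-length counter vs. two-ahead window); same cost, exact same results.

-- ===== PORT A =====
-- A slides an index i and checks ord(p[i])-ord(p[i+1]) == -1 and ord(p[i+1])-ord(p[i+2]) == -1;
-- ported as structural recursion on the char list matching a three-element window (the while
-- loop's i < len-2 condition is exactly "at least three chars remain").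
def check_for_sequence_go : List Char → Bool
  | a :: b :: c :: rest =>
      if (a.toNat : Int) - (b.toNat : Int) = -1 then
        if (b.toNat : Int) - (c.toNat : Int) = -1 then true
        else check_for_sequence_go (b :: c :: rest)
      else check_for_sequence_go (b :: c :: rest)
  | _ => false

def check_for_sequence (password : String) : Bool :=
  check_for_sequence_go password.toList

-- ===== PORT B =====
-- B iterates over adjacent pairs (prev, cur) keeping a run counter; run += 1 on a +1 step
-- (returning true when it reaches 3), reset to 1 otherwise.
def check_for_sequence_alt_go (prev : Char) (run : Nat) : List Char → Bool
  | [] => false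
  | cur :: rest =>
      if (cur.toNat : Int) - (prev.toNat : Int) = 1 then
        if run + 1 = 3 then true
        else check_for_sequence_alt_go cur (run + 1) rest
      else check_for_sequence_alt_go cur 1 rest

def check_for_sequence_alt (password : String) : Bool :=
  match password.toList with
  | [] => false
  | c :: rest => check_for_sequence_alt_go c 1 rest

-- ===== PRECONDITION & SPEC =====
def Spec_check_for_sequence (password : String) (out : Bool) : Prop := out = check_for_sequence_alt password
instance (password : String) (out : Bool) : Decidable (Spec_check_for_sequence password out) := by unfold Spec_check_for_sequence; infer_instance

-- ===== CLAIM (what is proved, stated in full; the proofs are below) =====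
def Claim_equal_check_for_sequence : Prop := ∀ (password : String), Dom_check_for_sequence password → Spec_check_for_sequence password (check_for_sequence password)

-- ===== LEMMAS AND PROOFS =====

theorem go_skip (c d : Char) (rest : List Char) (h : ¬ ((c.toNat : Int) - (d.toNat : Int) = -1)) :
    check_for_sequence_go (c :: d :: rest) = check_for_sequence_go (d :: rest) := by
  cases rest with
  | nil => simp [check_for_sequence_go]
  | cons e r => simp [check_for_sequence_go, h]

theorem go_eq_aux (n : Nat) : ∀ (cs : List Char), cs.length ≤ n →
    ∀ (prev : Char), check_for_sequence_alt_go prev 1 cs = check_for_sequence_go (prev :: cs) := by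
  induction n with
  | zero =>
      intro cs h prev
      match cs with
      | [] => simp [check_for_sequence_alt_go, check_for_sequence_go]
      | _ :: _ => simp at h
  | succ n ih =>
      intro cs h prev
      match cs with
      | [] => simp [check_for_sequence_alt_go, check_for_sequence_go]
      | [c] =>
          simp only [check_for_sequence_alt_go, check_for_sequence_go]
          split <;> rfl
      | c :: d :: rest =>
          simp only [List.length_cons, Nat.add_le_add_iff_right] at h
          have hrest : rest.length ≤ n := by omega
          have hcd : (d :: rest).length ≤ n := by simp; omega
          by_cases h1 : (c.toNat : Int) - (prev.toNat : Int) = 1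
          · by_cases h2 : (d.toNat : Int) - (c.toNat : Int) = 1
            · have ha1 : (prev.toNat : Int) - (c.toNat : Int) = -1 := by omega
              have ha2 : (c.toNat : Int) - (d.toNat : Int) = -1 := by omega
              simp [check_for_sequence_alt_go, check_for_sequence_go, h1, h2, ha1, ha2]
            · have ha2 : ¬ ((c.toNat : Int) - (d.toNat : Int) = -1) := by omega
              rw [check_for_sequence_alt_go, if_pos h1, if_neg (by omega)]
              rw [check_for_sequence_alt_go, if_neg (by omega)]
              rw [ih rest hrest d]
              rw [check_for_sequence_go, if_pos (by omega : (prev.toNat : Int) - (c.toNat : Int) = -1),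
                  if_neg ha2, go_skip c d rest ha2]
          · rw [check_for_sequence_alt_go, if_neg h1]
            rw [ih (d :: rest) hcd c]
            rw [go_skip prev c (d :: rest) (by omega)]

theorem go_eq (cs : List Char) (prev : Char) :
    check_for_sequence_alt_go prev 1 cs = check_for_sequence_go (prev :: cs) :=
  go_eq_aux cs.length cs le_rfl prev

-- ===== VERDICT (by name: the statement is the Claim_ definition above) =====
theorem check_for_sequence_spec : Claim_equal_check_for_sequence := by
  intro password _
  unfold Spec_check_for_sequence check_for_sequence check_for_sequence_alt
  match h : password.toList with
  | [] => simp [check_for_sequence_go]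
  | c :: rest => exact (go_eq rest c).symm
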